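-- pv_equiv track=rewrite | github.com/GundalaNikhil/DSA | dsa-problems/Sorting/solutions/python/SRT-012-count-within-threshold-after-self.py | count_within_threshold
-- ===== SOURCE A (Python) =====
-- def count_within_threshold(arr: list[int], T: int) -> list[int]:
--     n = len(arr)
--     counts = [0] * n
--     pairs = [(arr[i], i) for i in range(n)]
--
--     def merge_sort(sub_arr):
--         if len(sub_arr) <= 1:
--             return sub_arr
--
--         mid = len(sub_arr) // 2
--         left = merge_sort(sub_arr[:mid])
--         right = merge_sort(sub_arr[mid:])
--
--         # Count step
--         q = 0
--         for p in range(len(left)):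
--             threshold = left[p][0] - T
--             while q < len(right) and right[q][0] < threshold:
--                 q += 1
--             counts[left[p][1]] += (len(right) - q)
--
--         # Merge step
--         res = []
--         i, j = 0, 0
--         while i < len(left) and j < len(right):
--             if left[i][0] <= right[j][0]:
--                 res.append(left[i])
--                 i += 1
--             else:
--                 res.append(right[j])
--                 j += 1
--         res.extend(left[i:])
--         res.extend(right[j:])
--         return res
--
--     merge_sort(pairs)
--     return counts
-- ===== SOURCE B (Python) =====
-- def count_within_threshold(arr: list[int], T: int) -> list[int]:
--     # Direct one-comprehension count: for each i, count later elements x with arr[i] - x <= T.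
--     return [sum(1 for x in arr[i + 1:] if arr[i] - x <= T) for i in range(len(arr))]
-- ===== Notes on version B (the rewrite author's own statement) =====
-- stated objective: simpler
-- what changed: Replaced the merge-sort / CDQ cross-counting with state threaded through recursion by a direct suffix-scan comprehension counting later elements x with arr[i]-x <= T for each i.
import Mathlib
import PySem

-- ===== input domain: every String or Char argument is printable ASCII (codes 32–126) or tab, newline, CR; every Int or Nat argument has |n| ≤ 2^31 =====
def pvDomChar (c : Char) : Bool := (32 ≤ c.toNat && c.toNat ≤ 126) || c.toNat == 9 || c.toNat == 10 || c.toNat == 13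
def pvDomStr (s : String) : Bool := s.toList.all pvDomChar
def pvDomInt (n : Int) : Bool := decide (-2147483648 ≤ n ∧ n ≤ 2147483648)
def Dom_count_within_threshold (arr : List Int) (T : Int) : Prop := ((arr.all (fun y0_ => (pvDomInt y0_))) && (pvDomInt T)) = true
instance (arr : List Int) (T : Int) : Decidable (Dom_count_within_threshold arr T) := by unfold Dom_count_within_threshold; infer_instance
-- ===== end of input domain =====

-- B replaces A's merge-sort/CDQ cross-counting with a direct suffix-scan comprehension (simpler; not faster).

-- ===== PORT A =====
-- A's pairs carry the loop index i from range(n) (always 0 ≤ i < n), kept here as a Nat.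
-- counts[idx] += x is ported as set/getD; idx is always < counts.length in every call A makes.

-- the inner `while q < len(right) and right[q][0] < threshold: q += 1`
def cwtAdv (right : List (Int × Nat)) (thr : Int) (q : Nat) : Nat :=
  if h : q < right.length ∧ (right.getD q (0, 0)).1 < thr then cwtAdv right thr (q + 1) else q
termination_by right.length - q
decreasing_by omega

-- the count step: `for p in range(len(left)): … counts[left[p][1]] += len(right) - q`
def cwtCount (T : Int) (right : List (Int × Nat)) : List (Int × Nat) → Nat → List Int → List Int
  | [], _, c => c
  | a :: rest, q, c =>
      let q' := cwtAdv right (a.1 - T) q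
      cwtCount T right rest q' (c.set a.2 (c.getD a.2 0 + ((right.length : Int) - (q' : Int))))

-- the merge step's while loop with accumulator res, then the two extends
def cwtMergeLoop : List (Int × Nat) → List (Int × Nat) → List (Int × Nat) → List (Int × Nat)
  | a :: l, b :: r, res =>
      if a.1 ≤ b.1 then cwtMergeLoop l (b :: r) (res ++ [a]) else cwtMergeLoop (a :: l) r (res ++ [b])
  | l, r, res => res ++ l ++ r
termination_by l r _ => l.length + r.length

-- merge_sort: returns (sorted sub-array, updated counts); the mutated `counts` is threaded through
def cwtSort (T : Int) (l : List (Int × Nat)) (c : List Int) : List (Int × Nat) × List Int :=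
  if l.length ≤ 1 then (l, c)
  else
    let p1 := cwtSort T (l.take (l.length / 2)) c
    let p2 := cwtSort T (l.drop (l.length / 2)) p1.2
    let c3 := cwtCount T p2.1 p1.1 0 p2.2
    (cwtMergeLoop p1.1 p2.1 [], c3)
termination_by l.length
decreasing_by
  · simp only [List.length_take]; omega
  · simp only [List.length_drop]; omega

def count_within_threshold (arr : List Int) (T : Int) : List Int :=
  let n := arr.length
  let counts := List.replicate n (0 : Int)
  let pairs := (List.range n).map (fun i => (arr.getD i 0, i))
  (cwtSort T pairs counts).2

-- ===== PORT B =====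
def count_within_threshold_alt (arr : List Int) (T : Int) : List Int :=
  (List.range arr.length).map
    (fun i => ((arr.drop (i + 1)).countP (fun x => arr.getD i 0 - x ≤ T) : Int))

-- ===== PRECONDITION & SPEC =====
def Spec_count_within_threshold (arr : List Int) (T : Int) (out : List Int) : Prop := out = count_within_threshold_alt arr T
instance (arr : List Int) (T : Int) (out : List Int) : Decidable (Spec_count_within_threshold arr T out) := by unfold Spec_count_within_threshold; infer_instance

-- ===== CLAIM (what is proved, stated in full; the proofs are below) =====
def Claim_equal_count_within_threshold : Prop := ∀ (arr : List Int) (T : Int), Dom_count_within_threshold arr T → Spec_count_within_threshold arr T (count_within_threshold arr T)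

-- ===== LEMMAS AND PROOFS =====

-- b `survives` a's threshold: a.1 - T ≤ b.1 (what A's count step counts per cross pair)
def cwtCond (T : Int) (a b : Int × Nat) : Bool := !(b.1 < a.1 - T)

-- number of later elements (within one list) counted for index i
def specd (T : Int) : List (Int × Nat) → Nat → Int
  | [], _ => 0
  | a :: rest, i => (if a.2 = i then (rest.countP (cwtCond T a) : Int) else 0) + specd T rest i

-- cross contribution of pairs (a ∈ left, b ∈ right) to index i
def crossd (T : Int) (right : List (Int × Nat)) : List (Int × Nat) → Nat → Int
  | [], _ => 0
  | a :: rest, i => (if a.2 = i then (right.countP (cwtCond T a) : Int) else 0) + crossd T right rest i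

def cwtLe (a b : Int × Nat) : Prop := a.1 ≤ b.1

lemma getD_set_int (c : List Int) (j : Nat) (x : Int) (i : Nat) (hj : j < c.length) :
    (c.set j x).getD i 0 = if j = i then x else c.getD i 0 := by
  simp only [List.getD_eq_getElem?_getD, List.getElem?_set]
  split <;> simp_all

lemma sorted_countP_lt (l : List (Int × Nat)) (hs : l.Pairwise cwtLe) (thr : Int) :
    ∀ k, k < l.length → (k < l.countP (fun b => b.1 < thr) ↔ (l.getD k (0, 0)).1 < thr) := by
  induction l with
  | nil => intro k hk; simp at hk
  | cons a rest ih =>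
    have ha : ∀ b ∈ rest, cwtLe a b := (List.pairwise_cons.mp hs).1
    have hrest := ih ((List.pairwise_cons.mp hs).2)
    intro k hk
    by_cases hpa : a.1 < thr
    · rw [show List.countP (fun b => decide (b.1 < thr)) (a :: rest) = List.countP (fun b => decide (b.1 < thr)) rest + 1 by simp [hpa]]
      cases k with
      | zero => simpa using hpa
      | succ k =>
        have := hrest k (by simpa using hk)
        simpa [List.getD_cons_succ] using this
    · have hall : ∀ b ∈ rest, ¬ b.1 < thr := by
        intro b hb
        have := ha b hb
        unfold cwtLe at this
        omega
      have h0 : (a :: rest).countP (fun b => b.1 < thr) = 0 := by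
        rw [List.countP_eq_zero]
        intro b hb
        rcases List.mem_cons.mp hb with h | h
        · subst h; simpa using hpa
        · simpa using hall b h
      rw [h0]
      cases k with
      | zero => simpa using hpa
      | succ k =>
        have hk' : k < rest.length := by simpa using hk
        have hmem : rest.getD k (0, 0) ∈ rest := by
          rw [List.getD_eq_getElem rest (0,0) hk']
          exact List.getElem_mem hk'
        simp only [List.getD_cons_succ]
        constructor
        · omega
        · intro hlt; exact absurd hlt (hall _ hmem)

lemma cwtAdv_eq (right : List (Int × Nat)) (hs : right.Pairwise cwtLe) (thr : Int) :
    ∀ q, q ≤ right.countP (fun b => b.1 < thr) → cwtAdv right thr q = right.countP (fun b => b.1 < thr) := by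
  intro q
  induction hq : right.length - q using Nat.strong_induction_on generalizing q with
  | _ n ih =>
    intro hle
    have hcl : right.countP (fun b => b.1 < thr) ≤ right.length := List.countP_le_length
    rw [cwtAdv]
    by_cases hql : q < right.length
    · have hiff := sorted_countP_lt right hs thr q hql
      by_cases heq : q = right.countP (fun b => b.1 < thr)
      · have : ¬ (right.getD q (0, 0)).1 < thr := by rw [← hiff]; omega
        rw [dif_neg (by tauto)]
        omega
      · have hlt : q < right.countP (fun b => b.1 < thr) := by omega
        rw [dif_pos ⟨hql, hiff.mp hlt⟩]
        exact ih (right.length - (q + 1)) (by omega) (q + 1) rfl (by omega)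
    · have : q = right.countP (fun b => b.1 < thr) := by omega
      rw [dif_neg (by tauto)]
      omega

lemma countP_lt_mono (l : List (Int × Nat)) {t t' : Int} (h : t ≤ t') :
    l.countP (fun b => b.1 < t) ≤ l.countP (fun b => b.1 < t') := by
  apply List.countP_mono_left
  intro a _ hlt
  simp only [decide_eq_true_eq] at *
  omega

lemma length_sub_countP (l : List (Int × Nat)) (T : Int) (a : Int × Nat) :
    (l.length : Int) - (l.countP (fun b => b.1 < a.1 - T) : Int) = (l.countP (cwtCond T a) : Int) := by
  have h := List.length_eq_countP_add_countP (p := fun b : Int × Nat => decide (b.1 < a.1 - T)) (l := l)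
  have hc : l.countP (fun b : Int × Nat => decide (¬ decide (b.1 < a.1 - T) = true)) = l.countP (cwtCond T a) := by
    apply List.countP_congr
    intro b _
    simp [cwtCond]
  rw [hc] at h
  omega

lemma cwtCount_spec (T : Int) (right : List (Int × Nat)) (hr : right.Pairwise cwtLe) :
    ∀ (left : List (Int × Nat)) (q : Nat) (c : List Int),
      left.Pairwise cwtLe →
      (∀ a ∈ left, a.2 < c.length) →
      (∀ a ∈ left, q ≤ right.countP (fun b => b.1 < a.1 - T)) →
      (cwtCount T right left q c).length = c.length ∧
      ∀ i, (cwtCount T right left q c).getD i 0 = c.getD i 0 + crossd T right left i := by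
  intro left
  induction left with
  | nil => intro q c _ _ _; simp [cwtCount, crossd]
  | cons a rest ih =>
    intro q c hsl hidx hq
    have hrs : rest.Pairwise cwtLe := (List.pairwise_cons.mp hsl).2
    have hha : ∀ b ∈ rest, cwtLe a b := (List.pairwise_cons.mp hsl).1
    have hq' : cwtAdv right (a.1 - T) q = right.countP (fun b => b.1 < a.1 - T) :=
      cwtAdv_eq right hr (a.1 - T) q (hq a (List.mem_cons_self))
    simp only [cwtCount]
    set q' := cwtAdv right (a.1 - T) q with hq'def
    set c' := c.set a.2 (c.getD a.2 0 + ((right.length : Int) - (q' : Int))) with hc'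
    have hlen' : c'.length = c.length := by simp [hc']
    have ha2 : a.2 < c.length := hidx a (List.mem_cons_self)
    obtain ⟨hL, hG⟩ := ih q' c' hrs
      (by intro b hb; rw [hlen']; exact hidx b (List.mem_cons_of_mem _ hb))
      (by
        intro b hb
        show q' ≤ _
        rw [hq']
        have := hha b hb
        unfold cwtLe at this
        exact countP_lt_mono right (by omega))
    refine ⟨by rw [hL, hlen'], ?_⟩
    intro i
    rw [hG i]
    have hset := getD_set_int c a.2 (c.getD a.2 0 + ((right.length : Int) - (q' : Int))) i ha2
    rw [hc']
    rw [hset]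
    have hcnt : (right.length : Int) - (q' : Int) = (right.countP (cwtCond T a) : Int) := by
      rw [hq']
      exact length_sub_countP right T a
    simp only [crossd]
    by_cases hai : a.2 = i
    · subst hai; rw [if_pos rfl, if_pos rfl, hcnt]; ring
    · rw [if_neg hai, if_neg hai]; ring

lemma cwtMergeLoop_eq (l r res : List (Int × Nat)) :
    ∃ m, cwtMergeLoop l r res = res ++ m ∧ m.Perm (l ++ r) ∧
      (l.Pairwise cwtLe → r.Pairwise cwtLe → m.Pairwise cwtLe) := by
  induction hn : l.length + r.length using Nat.strong_induction_on generalizing l r res with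
  | _ n ih =>
  rcases l with _ | ⟨a, l'⟩
  · exact ⟨r, by rw [cwtMergeLoop.eq_def]; simp, List.Perm.refl _, fun _ h => h⟩
  rcases r with _ | ⟨b, r'⟩
  · exact ⟨a :: l', by rw [cwtMergeLoop.eq_def]; simp, by simp, fun h _ => h⟩
  rw [cwtMergeLoop.eq_def]
  simp only []
  by_cases hab : a.1 ≤ b.1
  · rw [if_pos hab]
    obtain ⟨m₁, he, hp, hsrt⟩ := ih (l'.length + (b :: r').length) (by simp only [List.length_cons] at hn ⊢; omega) l' (b :: r') (res ++ [a]) rfl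
    refine ⟨a :: m₁, by rw [he]; simp, ?_, ?_⟩
    · exact hp.cons a
    · intro hl hr
      have hl' := (List.pairwise_cons.mp hl).2
      have hal := (List.pairwise_cons.mp hl).1
      refine List.pairwise_cons.mpr ⟨?_, hsrt hl' hr⟩
      intro x hx
      have hx' : x ∈ l' ++ b :: r' := hp.mem_iff.mp hx
      rcases List.mem_append.mp hx' with h | h
      · exact hal x h
      · rcases List.mem_cons.mp h with h | h
        · subst h; exact hab
        · have := (List.pairwise_cons.mp hr).1 x h
          unfold cwtLe at *
          omega
  · rw [if_neg hab]
    obtain ⟨m₁, he, hp, hsrt⟩ := ih ((a :: l').length + r'.length) (by simp only [List.length_cons] at hn ⊢; omega) (a :: l') r' (res ++ [b]) rfl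
    refine ⟨b :: m₁, by rw [he]; simp, ?_, ?_⟩
    · exact (hp.cons b).trans (by simpa using (List.perm_middle (a := b) (l₁ := a :: l') (l₂ := r')).symm)
    · intro hl hr
      have hr' := (List.pairwise_cons.mp hr).2
      have hbr := (List.pairwise_cons.mp hr).1
      refine List.pairwise_cons.mpr ⟨?_, hsrt hl hr'⟩
      intro x hx
      have hx' : x ∈ (a :: l') ++ r' := hp.mem_iff.mp hx
      have hba : cwtLe b a := by unfold cwtLe at *; omega
      rcases List.mem_append.mp hx' with h | h
      · rcases List.mem_cons.mp h with h | h
        · subst h; exact hba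
        · have := (List.pairwise_cons.mp hl).1 x h
          unfold cwtLe at *
          omega
      · exact hbr x h

lemma specd_append (T : Int) (l₁ l₂ : List (Int × Nat)) (i : Nat) :
    specd T (l₁ ++ l₂) i = specd T l₁ i + specd T l₂ i + crossd T l₂ l₁ i := by
  induction l₁ with
  | nil => simp [specd, crossd]
  | cons a l₁' ih =>
    simp only [List.cons_append, specd, crossd, ih, List.countP_append]
    split_ifs <;> push_cast <;> ring

lemma crossd_eq_sum (T : Int) (right left : List (Int × Nat)) (i : Nat) :
    crossd T right left i = (left.map (fun a => if a.2 = i then (right.countP (cwtCond T a) : Int) else 0)).sum := by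
  induction left with
  | nil => simp [crossd]
  | cons a l ih => simp [crossd, ih]

lemma crossd_perm (T : Int) {right right' left left' : List (Int × Nat)} (i : Nat)
    (h1 : right'.Perm right) (h2 : left'.Perm left) :
    crossd T right' left' i = crossd T right left i := by
  have h1' : ∀ a : Int × Nat, right'.countP (cwtCond T a) = right.countP (cwtCond T a) :=
    fun a => h1.countP_eq _
  rw [crossd_eq_sum, crossd_eq_sum]
  have hfe : (left'.map (fun a => if a.2 = i then (right'.countP (cwtCond T a) : Int) else 0)) =
      (left'.map (fun a => if a.2 = i then (right.countP (cwtCond T a) : Int) else 0)) := by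
    apply List.map_congr_left
    intro a _
    rw [h1' a]
  rw [hfe]
  exact (h2.map _).sum_eq

lemma cwtCount_length (T : Int) (right : List (Int × Nat)) :
    ∀ (left : List (Int × Nat)) (q : Nat) (c : List Int), (cwtCount T right left q c).length = c.length := by
  intro left
  induction left with
  | nil => intro q c; simp [cwtCount]
  | cons a rest ih => intro q c; simp [cwtCount, ih]

lemma cwtSort_spec (T : Int) (l : List (Int × Nat)) (c : List Int) :
    (cwtSort T l c).1.Perm l ∧ (cwtSort T l c).1.Pairwise cwtLe ∧
    (cwtSort T l c).2.length = c.length ∧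
    ((∀ a ∈ l, a.2 < c.length) → ∀ i, (cwtSort T l c).2.getD i 0 = c.getD i 0 + specd T l i) := by
  induction hn : l.length using Nat.strong_induction_on generalizing l c with
  | _ n ih =>
  subst hn
  rw [cwtSort]
  by_cases h : l.length ≤ 1
  · rw [if_pos h]
    refine ⟨List.Perm.refl _, ?_, rfl, ?_⟩
    · rcases l with _ | ⟨a, _ | ⟨b, t⟩⟩ <;> simp_all
    · intro _ i
      rcases l with _ | ⟨a, _ | ⟨b, t⟩⟩ <;> simp_all [specd]
  · rw [if_neg h]
    simp only []
    have hmid1 : l.length / 2 < l.length := by omega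
    have hmid0 : 1 ≤ l.length / 2 := by omega
    have hlt : (l.take (l.length / 2)).length < l.length := by
      rw [List.length_take]; omega
    have hld : (l.drop (l.length / 2)).length < l.length := by
      rw [List.length_drop]; omega
    obtain ⟨hperm1, hsort1, hlen1, hcnt1⟩ := ih _ hlt (l.take (l.length / 2)) c rfl
    obtain ⟨hperm2, hsort2, hlen2, hcnt2⟩ :=
      ih _ hld (l.drop (l.length / 2)) (cwtSort T (l.take (l.length / 2)) c).2 rfl
    set p1 := cwtSort T (l.take (l.length / 2)) c with hp1
    set p2 := cwtSort T (l.drop (l.length / 2)) p1.2 with hp2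
    obtain ⟨m, hme, hmp, hms⟩ := cwtMergeLoop_eq p1.1 p2.1 []
    have hmergeP : (cwtMergeLoop p1.1 p2.1 []).Perm l := by
      rw [hme]
      simp only [List.nil_append]
      refine hmp.trans ?_
      refine (hperm1.append hperm2).trans ?_
      rw [List.take_append_drop]
    refine ⟨hmergeP, by rw [hme]; simpa using hms hsort1 hsort2, ?_, ?_⟩
    · rw [cwtCount_length, hlen2, hlen1]
    · intro hidx i
      have hidx1 : ∀ a ∈ p1.1, a.2 < p2.2.length := by
        intro a ha
        rw [hlen2, hlen1]
        exact hidx a (List.take_subset _ _ (hperm1.mem_iff.mp ha))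
      obtain ⟨_, hcc⟩ := cwtCount_spec T p2.1 hsort2 p1.1 0 p2.2 hsort1 hidx1
        (fun a _ => Nat.zero_le _)
      rw [hcc i]
      have hcross : crossd T p2.1 p1.1 i =
          crossd T (l.drop (l.length / 2)) (l.take (l.length / 2)) i :=
        crossd_perm T i hperm2 hperm1
      rw [hcross]
      rw [hcnt2 (by
        intro a ha
        rw [hlen1]
        exact hidx a (List.drop_subset _ _ ha)) i]
      rw [hcnt1 (fun a ha => hidx a (List.take_subset _ _ ha)) i]
      have := specd_append T (l.take (l.length / 2)) (l.drop (l.length / 2)) i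
      rw [List.take_append_drop] at this
      rw [this]
      ring

lemma specd_range' (arr : List Int) (T : Int) :
    ∀ (m s i : Nat), specd T ((List.range' s m).map (fun j => (arr.getD j 0, j))) i =
      if s ≤ i ∧ i < s + m then
        (((List.range' (i + 1) (s + m - (i + 1))).map (fun j => (arr.getD j 0, j))).countP
          (cwtCond T (arr.getD i 0, i)) : Int)
      else 0 := by
  intro m
  induction m with
  | zero => intro s i; rw [if_neg (by omega)]; simp [specd]
  | succ m ihm =>
    intro s i
    rw [List.range'_succ, List.map_cons]
    simp only [specd]
    rw [ihm (s + 1) i]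
    by_cases his : i = s
    · subst his
      rw [if_pos rfl, if_neg (by omega), if_pos (by omega)]
      have : i + (m + 1) - (i + 1) = m := by omega
      rw [this]
      ring
    · rw [if_neg (by omega)]
      by_cases hin : s + 1 ≤ i ∧ i < s + 1 + m
      · rw [if_pos hin, if_pos (by omega)]
        have : s + 1 + m - (i + 1) = s + (m + 1) - (i + 1) := by omega
        rw [this]
        ring
      · rw [if_neg hin, if_neg (by omega)]
        ring

lemma drop_eq_range'_map (arr : List Int) (k : Nat) :
    arr.drop k = (List.range' k (arr.length - k)).map (fun j => arr.getD j 0) := by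
  apply List.ext_getElem
  · simp
  · intro t h1 h2
    simp only [List.getElem_drop, List.getElem_map, List.getElem_range']
    rw [List.getD_eq_getElem arr 0 (by simp at h2; omega)]
    congr 1
    omega

theorem count_within_threshold_eq (arr : List Int) (T : Int) :
    count_within_threshold arr T = count_within_threshold_alt arr T := by
  unfold count_within_threshold count_within_threshold_alt
  simp only []
  set n := arr.length with hn
  set f : Nat → Int × Nat := fun i => (arr.getD i 0, i) with hf
  obtain ⟨_, _, hlen, hcnt⟩ := cwtSort_spec T ((List.range n).map f) (List.replicate n (0 : Int))
  have hidx : ∀ a ∈ (List.range n).map f, a.2 < (List.replicate n (0 : Int)).length := by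
    intro a ha
    rw [List.length_replicate]
    obtain ⟨j, hj, rfl⟩ := List.mem_map.mp ha
    simpa [hf] using List.mem_range.mp hj
  have hcnt' := hcnt hidx
  apply List.ext_getElem
  · rw [hlen]; simp
  · intro i h1 h2
    have hi : i < n := by rw [hlen] at h1; simpa using h1
    have hL : (cwtSort T ((List.range n).map f) (List.replicate n (0 : Int))).2[i] =
        (cwtSort T ((List.range n).map f) (List.replicate n (0 : Int))).2.getD i 0 :=
      (List.getD_eq_getElem _ 0 h1).symm
    rw [hL, hcnt' i]
    have hrep : (List.replicate n (0 : Int)).getD i 0 = 0 := by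
      rw [List.getD_eq_getElem _ 0 (by simpa using hi)]
      simp
    rw [hrep]
    have hspec : specd T ((List.range n).map f) i =
        (((List.range' (i + 1) (n - (i + 1))).map f).countP (cwtCond T (f i)) : Int) := by
      rw [List.range_eq_range']
      rw [specd_range' arr T n 0 i]
      rw [if_pos ⟨Nat.zero_le i, by omega⟩]
      have : 0 + n - (i + 1) = n - (i + 1) := by omega
      rw [this]
    rw [hspec]
    simp only [List.getElem_map, List.getElem_range]
    have hdrop := drop_eq_range'_map arr (i + 1)
    rw [hdrop, List.countP_map, List.countP_map, zero_add, hn]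
    congr 1
    apply List.countP_congr
    intro j _
    simp only [Function.comp_apply, cwtCond, hf, Bool.not_eq_true', decide_eq_false_iff_not,
      decide_eq_true_eq]
    omega

-- ===== VERDICT (by name: the statement is the Claim_ definition above) =====
theorem count_within_threshold_spec : Claim_equal_count_within_threshold := by
  intro arr T _
  unfold Spec_count_within_threshold
  exact count_within_threshold_eq arr T
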